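-- pv_equiv track=rewrite | github.com/ozielmaxwell/python-Assignment | Maxwell_Oziel.py | calculate_scores_in_word
-- ===== SOURCE A (Python) =====
-- def is_last_letter(name, i):
--     """
--     Check if the character at position i in name is the last letter of a word in CamelCase.
--
--     Returns:
--     True if name[i] is the last letter of a word.
--     """
--     return i == len(name) - 1 or name[i + 1].isupper()
--
-- def calculate_scores_in_word(name_camel_case, letter_values):
--     """
--     Calculate values for each character in a name. Name is expected to be in CamelCase.
--
--     Returns:
--     A list of scores where list[i] is the score for name[i].
--     """
--     name = name_camel_case
--     char_word_pos = 0
--     scores = [-1] * len(name)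
--
--     for i in range(len(name)):
--         if char_word_pos == 0:
--             scores[i] = 0
--         elif is_last_letter(name, i):
--             scores[i] = 5 if name[i].upper() != 'E' else 20
--         else:
--             bonus = min(char_word_pos, 3)  # Use min to handle cases where char_word_pos is greater than 3
--             scores[i] = letter_values[name[i].upper()] + bonus
--
--         char_word_pos = 0 if is_last_letter(name, i) else char_word_pos + 1
--
--     return scores
-- ===== SOURCE B (Python) =====
-- def _score_word(word, letter_values):
--     """Score one CamelCase word in isolation: first letter 0, last letter 5
--     (20 for E), middle letters letter value + capped position bonus."""
--     out = [0]
--     for pos in range(1, len(word) - 1):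
--         out.append(letter_values[word[pos].upper()] + min(pos, 3))
--     if len(word) > 1:
--         out.append(20 if word[-1].upper() == 'E' else 5)
--     return out
--
--
-- def calculate_scores_in_word(name_camel_case, letter_values):
--     chars = list(name_camel_case)
--     n = len(chars)
--     scores = []
--     i = 0
--     while i < n:
--         j = i + 1
--         while j < n and not chars[j].isupper():
--             j += 1
--         scores.extend(_score_word(chars[i:j], letter_values))
--         i = j
--     return scores
-- ===== Notes on version B (the rewrite author's own statement) =====
-- stated objective: alternative
-- what changed: A runs one flat index loop over the whole name carrying a char_word_pos counter and writing into a preallocated scores list; B instead segments the name into CamelCase words (head char plus its run of non-uppercase chars) and scores each word in isolation, concatenating the per-word score lists.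
import Mathlib
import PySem

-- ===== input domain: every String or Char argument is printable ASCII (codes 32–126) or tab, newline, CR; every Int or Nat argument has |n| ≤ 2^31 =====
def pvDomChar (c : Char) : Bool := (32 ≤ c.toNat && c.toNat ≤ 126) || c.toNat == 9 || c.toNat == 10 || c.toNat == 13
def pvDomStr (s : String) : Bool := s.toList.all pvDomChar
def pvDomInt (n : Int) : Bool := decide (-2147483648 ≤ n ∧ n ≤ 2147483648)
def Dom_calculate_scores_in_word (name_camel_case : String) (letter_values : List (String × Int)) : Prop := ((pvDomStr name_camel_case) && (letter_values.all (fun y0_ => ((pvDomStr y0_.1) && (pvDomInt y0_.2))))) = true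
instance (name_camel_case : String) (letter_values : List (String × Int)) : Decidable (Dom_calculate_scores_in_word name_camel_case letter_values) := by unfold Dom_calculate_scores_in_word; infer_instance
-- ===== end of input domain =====

-- B rewrites A's single stateful index loop as word segmentation: split the name into
-- CamelCase words and score each word in isolation, concatenating the per-word scores
-- (objective: alternative decomposition, same cost).
-- Equivalence is about the return value only; neither program mutates its arguments.

-- B rewrites A's single stateful index loop as word segmentation: split the name into
-- CamelCase words and score each word in isolation, concatenating the per-word score lists
-- (objective: alternative decomposition, same cost). Return-value equivalence; no mutation.

-- ===== PORT A =====
-- shared by both ports: the Python expression letter_values[ch.upper()]; total via getD 0,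
-- Pre_ excludes exactly the inputs where this lookup is a KeyError in Python.
def pvLookup (lv : List (String × Int)) (c : Char) : Int :=
  ((PySem.Dict.ofList lv).get? (String.ofList [PySem.Chars.upperChar c])).getD 0

def pvIsLast (name : List Char) (i : Nat) : Bool :=
  i == name.length - 1 || PySem.Chars.isupper (name.getD (i + 1) ' ')

-- the body of A's for-loop; state = (char_word_pos, scores)
def pvStep (lv : List (String × Int)) (name : List Char) (st : Nat × List Int) (i : Nat) :
    Nat × List Int :=
  let scores :=
    if st.1 == 0 then st.2.set i 0
    else if pvIsLast name i then
      st.2.set i (if PySem.Chars.upperChar (name.getD i ' ') ≠ 'E' then 5 else 20)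
    else
      st.2.set i (pvLookup lv (name.getD i ' ') + ((min st.1 3 : Nat) : Int))
  (if pvIsLast name i then 0 else st.1 + 1, scores)

def calculate_scores_in_word (name_camel_case : String) (letter_values : List (String × Int)) : List Int :=
  let name := name_camel_case.toList
  ((List.range name.length).foldl (pvStep letter_values name)
    (0, List.replicate name.length (-1))).2

-- ===== PORT B =====
-- _score_word: [0], the middle-letter loop over range(1, len-1), then the last letter
def pvScoreWord (lv : List (String × Int)) (word : List Char) : List Int :=
  ((0 : Int) :: (List.range' 1 (word.length - 1 - 1)).map
      (fun pos => pvLookup lv (word.getD pos ' ') + ((min pos 3 : Nat) : Int))) ++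
    (if 1 < word.length then
      [if PySem.Chars.upperChar (word.getD (word.length - 1) ' ') == 'E' then 20 else 5]
    else [])

-- outer while loop: peel one word (head char + maximal non-uppercase run) per step;
-- fuel (≥ length, consumed once per word) only makes the recursion structural
def pvSplitGo (lv : List (String × Int)) : Nat → List Char → List Int
  | 0, _ => []
  | _ + 1, [] => []
  | fuel + 1, c :: rest =>
      pvScoreWord lv (c :: rest.takeWhile (fun d => !PySem.Chars.isupper d)) ++
        pvSplitGo lv fuel (rest.dropWhile (fun d => !PySem.Chars.isupper d))

def calculate_scores_in_word_alt (name_camel_case : String) (letter_values : List (String × Int)) : List Int :=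
  pvSplitGo letter_values name_camel_case.toList.length name_camel_case.toList

-- ===== PRECONDITION & SPEC =====
-- Pre_ excludes exactly the inputs where Python A raises KeyError: some character that is
-- neither first nor last in its CamelCase word whose uppercased letter is not a key of
-- letter_values.
def Pre_calculate_scores_in_word (name_camel_case : String) (letter_values : List (String × Int)) : Prop :=
  ∀ i : Nat, i < name_camel_case.toList.length → 0 < i →
    PySem.Chars.isupper (name_camel_case.toList.getD i ' ') = false →
    ¬ (i = name_camel_case.toList.length - 1 ∨
        PySem.Chars.isupper (name_camel_case.toList.getD (i + 1) ' ') = true) →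
    ((PySem.Dict.ofList letter_values).get?
        (String.ofList [PySem.Chars.upperChar (name_camel_case.toList.getD i ' ')])).isSome = true

instance (name_camel_case : String) (letter_values : List (String × Int)) : Decidable (Pre_calculate_scores_in_word name_camel_case letter_values) := by
  unfold Pre_calculate_scores_in_word; infer_instance

def pvWitness_calculate_scores_in_word : String × (List (String × Int)) := ("CodE", [("O", 10)])

def Spec_calculate_scores_in_word (name_camel_case : String) (letter_values : List (String × Int)) (out : List Int) : Prop := out = calculate_scores_in_word_alt name_camel_case letter_values
instance (name_camel_case : String) (letter_values : List (String × Int)) (out : List Int) : Decidable (Spec_calculate_scores_in_word name_camel_case letter_values out) := by unfold Spec_calculate_scores_in_word; infer_instance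

-- ===== CLAIM (what is proved, stated in full; the proofs are below) =====
def Claim_equal_calculate_scores_in_word : Prop := ∀ (name_camel_case : String) (letter_values : List (String × Int)), Dom_calculate_scores_in_word name_camel_case letter_values → Pre_calculate_scores_in_word name_camel_case letter_values → Spec_calculate_scores_in_word name_camel_case letter_values (calculate_scores_in_word name_camel_case letter_values)

-- ===== LEMMAS AND PROOFS =====

-- reference form of the computation: one structural pass carrying the in-word position
def pvSpec (lv : List (String × Int)) (pos : Nat) : List Char → List Int
  | [] => []
  | c :: rest =>
      (if pos == 0 then 0
       else if (rest.isEmpty || PySem.Chars.isupper (rest.headD ' ')) then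
         (if PySem.Chars.upperChar c ≠ 'E' then (5 : Int) else 20)
       else pvLookup lv c + ((min pos 3 : Nat) : Int)) ::
        pvSpec lv (if (rest.isEmpty || PySem.Chars.isupper (rest.headD ' ')) then 0 else pos + 1) rest

theorem pvSpec_cons (lv : List (String × Int)) (pos : Nat) (c : Char) (rest : List Char) :
    pvSpec lv pos (c :: rest)
      = (if pos == 0 then 0
         else if (rest.isEmpty || PySem.Chars.isupper (rest.headD ' ')) then
           (if PySem.Chars.upperChar c ≠ 'E' then (5 : Int) else 20)
         else pvLookup lv c + ((min pos 3 : Nat) : Int)) ::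
          pvSpec lv (if (rest.isEmpty || PySem.Chars.isupper (rest.headD ' ')) then 0 else pos + 1) rest := rfl

theorem pvGetDopt (cs : List Char) (k : Nat) (hk : k < cs.length) :
    cs[k]?.getD ' ' = cs[k] := by
  simp [List.getElem?_eq_getElem hk]

theorem pvIsLast_eq (cs : List Char) (k : Nat) (hk : k < cs.length) :
    pvIsLast cs k
      = ((cs.drop (k+1)).isEmpty || PySem.Chars.isupper ((cs.drop (k+1)).headD ' ')) := by
  unfold pvIsLast
  by_cases h1 : k + 1 < cs.length
  · have hd : cs.drop (k+1) = cs[k+1] :: cs.drop (k+2) := List.drop_eq_getElem_cons h1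
    have hgd1 : cs.getD (k+1) ' ' = cs[k+1] := List.getD_eq_getElem _ _ h1
    have hne : (k == cs.length - 1) = false := by simp; omega
    rw [hne, hgd1, hd]
    simp only [Bool.false_or, List.isEmpty_cons, List.headD_cons]
  · have hlen : cs.length = k + 1 := by omega
    have hd : cs.drop (k+1) = [] := by rw [← hlen]; simp
    rw [hd]
    simp [hlen]

theorem pvA_gen (lv : List (String × Int)) (cs : List Char) :
    ∀ (m k pos : Nat) (done : List Int), done.length = k → cs.length = k + m →
      ((List.range' k m).foldl (pvStep lv cs) (pos, done ++ List.replicate m (-1))).2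
        = done ++ pvSpec lv pos (cs.drop k) := by
  intro m
  induction m with
  | zero =>
      intro k pos done hd hl
      rw [List.drop_of_length_le (by omega)]
      simp [pvSpec]
  | succ m ih =>
      intro k pos done hd hl
      have hk : k < cs.length := by omega
      have hdrop : cs.drop k = cs[k] :: cs.drop (k+1) := List.drop_eq_getElem_cons hk
      have hgd : cs.getD k ' ' = cs[k] := List.getD_eq_getElem _ _ hk
      have hlast := pvIsLast_eq cs k hk
      have hset : ∀ v : Int,
          (done ++ List.replicate (m+1) (-1)).set k v = (done ++ [v]) ++ List.replicate m (-1) := by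
        intro v
        rw [List.set_append_right _ _ (by omega)]
        simp [hd, List.replicate_succ]
      rw [List.range'_succ, List.foldl_cons, hdrop, pvSpec_cons, ← hlast]
      by_cases hp : pos = 0
      · by_cases hl2 : pvIsLast cs k = true
        · have hstep : pvStep lv cs (pos, done ++ List.replicate (m+1) (-1)) k
              = (0, (done ++ [0]) ++ List.replicate m (-1)) := by
            simp [pvStep, hp, hl2, hset 0]
          rw [hstep, ih (k+1) 0 (done ++ [0]) (by simp [hd]) (by omega)]
          simp [hp, hl2, List.append_assoc]
        · have hl2' : pvIsLast cs k = false := by revert hl2; cases pvIsLast cs k <;> simp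
          have hstep : pvStep lv cs (pos, done ++ List.replicate (m+1) (-1)) k
              = (1, (done ++ [0]) ++ List.replicate m (-1)) := by
            simp [pvStep, hp, hl2', hset 0]
          rw [hstep, ih (k+1) 1 (done ++ [0]) (by simp [hd]) (by omega)]
          simp [hp, hl2', List.append_assoc]
      · have hp' : (pos == 0) = false := by simp [hp]
        by_cases hl2 : pvIsLast cs k = true
        · have hstep : pvStep lv cs (pos, done ++ List.replicate (m+1) (-1)) k
              = (0, (done ++ [if PySem.Chars.upperChar cs[k] ≠ 'E' then (5 : Int) else 20])
                  ++ List.replicate m (-1)) := by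
            simp [pvStep, hp', hl2, hset _, pvGetDopt cs k hk]
          rw [hstep, ih (k+1) 0 (done ++ [_]) (by simp [hd]) (by omega)]
          simp [hp', hl2, List.append_assoc]
        · have hl2' : pvIsLast cs k = false := by revert hl2; cases pvIsLast cs k <;> simp
          have hstep : pvStep lv cs (pos, done ++ List.replicate (m+1) (-1)) k
              = (pos + 1, (done ++ [pvLookup lv cs[k] + ((min pos 3 : Nat) : Int)])
                  ++ List.replicate m (-1)) := by
            simp [pvStep, hp', hl2', hset _, pvGetDopt cs k hk]
          rw [hstep, ih (k+1) (pos+1) (done ++ [_]) (by simp [hd]) (by omega)]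
          simp [hp', hl2', List.append_assoc]

theorem pvA_eq_spec (lv : List (String × Int)) (s : String) :
    calculate_scores_in_word s lv = pvSpec lv 0 s.toList := by
  show ((List.range s.toList.length).foldl (pvStep lv s.toList)
    (0, List.replicate s.toList.length (-1))).2 = _
  rw [List.range_eq_range']
  have h := pvA_gen lv s.toList s.toList.length 0 0 [] rfl (by omega)
  simpa using h

theorem pvMid_spec (lv : List (String × Int)) (w rest' : List Char) :
    ∀ (n p : Nat), n = w.length - 1 - p → 0 < p → p + 1 ≤ w.length →
      (∀ d ∈ w.drop 1, PySem.Chars.isupper d = false) →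
      (rest'.isEmpty || PySem.Chars.isupper (rest'.headD ' ')) = true →
      pvSpec lv p (w.drop p ++ rest')
        = (List.range' p n).map
            (fun pos => pvLookup lv (w.getD pos ' ') + ((min pos 3 : Nat) : Int))
            ++ (if PySem.Chars.upperChar (w.getD (w.length - 1) ' ') == 'E' then (20 : Int) else 5)
              :: pvSpec lv 0 rest' := by
  intro n
  induction n with
  | zero =>
      intro p hn hp hpl hlow hrest
      have hpl' : p = w.length - 1 := by omega
      have hk : p < w.length := by omega
      have hdrop : w.drop p = w[p] :: w.drop (p+1) := List.drop_eq_getElem_cons hk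
      have hd2 : w.drop (p+1) = [] := by apply List.drop_of_length_le; omega
      have hp0 : (p == 0) = false := by simp; omega
      rw [hdrop, hd2]
      simp only [List.nil_append, List.cons_append, pvSpec_cons, hp0, Bool.false_eq_true,
        if_false, hrest, if_true, List.range'_zero, List.map_nil]
      have hgd : w.getD (w.length - 1) ' ' = w[p] := by
        rw [← hpl']; exact List.getD_eq_getElem _ _ hk
      rw [hgd]
      by_cases he : PySem.Chars.upperChar w[p] = 'E' <;> simp [he]
  | succ n ih =>
      intro p hn hp hpl hlow hrest
      have hk : p < w.length := by omega
      have hk1 : p + 1 < w.length := by omega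
      have hdrop : w.drop p = w[p] :: w.drop (p+1) := List.drop_eq_getElem_cons hk
      have hdrop1 : w.drop (p+1) = w[p+1] :: w.drop (p+2) := List.drop_eq_getElem_cons hk1
      have hp0 : (p == 0) = false := by simp; omega
      have hupnext : PySem.Chars.isupper w[p+1] = false := by
        apply hlow
        have h1 : w[p+1] = (w.drop 1)[p]'(by simp; omega) := by
          rw [List.getElem_drop]
          congr 1
          omega
        rw [h1]
        exact List.getElem_mem _
      have hgd : w.getD p ' ' = w[p] := List.getD_eq_getElem _ _ hk
      have hflag : ((w.drop (p+1) ++ rest').isEmpty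
          || PySem.Chars.isupper ((w.drop (p+1) ++ rest').headD ' ')) = false := by
        rw [hdrop1, List.cons_append]
        simp [hupnext]
      rw [hdrop, List.cons_append, pvSpec_cons, hflag]
      simp only [hp0, Bool.false_eq_true, if_false]
      rw [ih (p+1) (by omega) (by omega) (by omega) hlow hrest, List.range'_succ,
        List.map_cons, hgd]
      simp [List.cons_append]

theorem pvWord_spec (lv : List (String × Int)) (c : Char) (low rest' : List Char)
    (hlow : ∀ d ∈ low, PySem.Chars.isupper d = false)
    (hrest : (rest'.isEmpty || PySem.Chars.isupper (rest'.headD ' ')) = true) :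
    pvSpec lv 0 (c :: (low ++ rest'))
      = pvScoreWord lv (c :: low) ++ pvSpec lv 0 rest' := by
  cases low with
  | nil =>
      rw [List.nil_append, pvSpec_cons, hrest]
      simp [pvScoreWord]
  | cons d low2 =>
      have hd : PySem.Chars.isupper d = false := hlow d (by simp)
      have htail := pvMid_spec lv (c :: (d :: low2)) rest'
        ((c :: (d :: low2)).length - 1 - 1) 1 rfl (by omega) (by simp) (by simpa using hlow) hrest
      simp only [List.drop_succ_cons, List.drop_zero] at htail
      have hflag : (((d :: low2) ++ rest').isEmpty
          || PySem.Chars.isupper (((d :: low2) ++ rest').headD ' ')) = false := by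
        simp [hd]
      rw [pvSpec_cons, hflag]
      simp only [beq_self_eq_true, if_true, Bool.false_eq_true, if_false, Nat.zero_add,
        List.cons_append]
      simp only [List.cons_append] at htail
      rw [htail]
      simp [pvScoreWord]

theorem pvB_gen (lv : List (String × Int)) :
    ∀ (fuel : Nat) (cs : List Char), cs.length ≤ fuel →
      pvSplitGo lv fuel cs = pvSpec lv 0 cs := by
  intro fuel
  induction fuel with
  | zero =>
      intro cs h
      have : cs = [] := by cases cs <;> simp_all
      subst this
      simp [pvSplitGo, pvSpec]
  | succ fuel ih =>
      intro cs h
      cases cs with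
      | nil => simp [pvSplitGo, pvSpec]
      | cons c rest =>
          have hsplit : rest.takeWhile (fun d => !PySem.Chars.isupper d)
              ++ rest.dropWhile (fun d => !PySem.Chars.isupper d) = rest :=
            List.takeWhile_append_dropWhile
          have hlow : ∀ d ∈ rest.takeWhile (fun d => !PySem.Chars.isupper d),
              PySem.Chars.isupper d = false := by
            intro d hdm
            have := List.mem_takeWhile_imp hdm
            simpa using this
          have hrest : ((rest.dropWhile (fun d => !PySem.Chars.isupper d)).isEmpty
              || PySem.Chars.isupper ((rest.dropWhile (fun d => !PySem.Chars.isupper d)).headD ' ')) = true := by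
            cases hr : rest.dropWhile (fun d => !PySem.Chars.isupper d) with
            | nil => simp
            | cons x xs =>
                have hne : rest.dropWhile (fun d => !PySem.Chars.isupper d) ≠ [] := by simp [hr]
                have hx := List.head_dropWhile_not (p := fun d => !PySem.Chars.isupper d)
                  (l := rest) hne
                simp only [hr, List.head_cons] at hx
                simp only [List.isEmpty_cons, List.headD_cons, Bool.false_or]
                simpa using hx
          have hfuel : (rest.dropWhile (fun d => !PySem.Chars.isupper d)).length ≤ fuel := by
            have := List.length_dropWhile_le (p := fun d => !PySem.Chars.isupper d) (l := rest)
            simp at h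
            omega
          rw [pvSplitGo, ih _ hfuel]
          conv_rhs => rw [show c :: rest = c :: (rest.takeWhile (fun d => !PySem.Chars.isupper d)
            ++ rest.dropWhile (fun d => !PySem.Chars.isupper d)) from by rw [hsplit]]
          exact (pvWord_spec lv c _ _ hlow hrest).symm

theorem pvB_eq_spec (lv : List (String × Int)) (cs : List Char) :
    pvSplitGo lv cs.length cs = pvSpec lv 0 cs :=
  pvB_gen lv cs.length cs le_rfl

-- ===== VERDICT (by name: the statement is the Claim_ definition above) =====
theorem calculate_scores_in_word_spec : Claim_equal_calculate_scores_in_word := by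
  intro name lv _ _
  unfold Spec_calculate_scores_in_word calculate_scores_in_word_alt
  rw [pvA_eq_spec, pvB_eq_spec]
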